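-- pv_equiv track=rewrite | github.com/aditgautam/dsc80 | labs/lab06/lab.py | _to_bare_product_path
-- ===== SOURCE A (Python) =====
-- def _to_bare_product_path(href: str) -> str:
--     href = href.strip()
--     while href.startswith("../"):
--         href = href[3:]
--     while href.startswith("/"):
--         href = href[1:]
--     if href.startswith("catalogue/"):
--         href = href[len("catalogue/"):]
--     return href
-- ===== SOURCE B (Python) =====
-- def _to_bare_product_path(href: str) -> str:
--     # Compute a single cut index by scanning characters once, then slice once:
--     # leading chars matching the rotating pattern "../" (complete groups only),
--     # then leading '/', then one optional "catalogue/".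
--     s = href.strip()
--     i = 0
--     while i < len(s) and s[i] == "../"[i % 3]:
--         i += 1
--     i -= i % 3  # only whole "../" groups count
--     while i < len(s) and s[i] == '/':
--         i += 1
--     if s.startswith("catalogue/", i):
--         i += len("catalogue/")
--     return s[i:]
-- ===== Notes on version B (the rewrite author's own statement) =====
-- stated objective: alternative
-- what changed: Instead of A's three string-rebuilding peel loops, B scans characters once against the rotating three-char dot-dot-slash pattern plus a slash run to compute one cut index arithmetically (truncated to whole groups) and slices the string a single time.
import Mathlib
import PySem

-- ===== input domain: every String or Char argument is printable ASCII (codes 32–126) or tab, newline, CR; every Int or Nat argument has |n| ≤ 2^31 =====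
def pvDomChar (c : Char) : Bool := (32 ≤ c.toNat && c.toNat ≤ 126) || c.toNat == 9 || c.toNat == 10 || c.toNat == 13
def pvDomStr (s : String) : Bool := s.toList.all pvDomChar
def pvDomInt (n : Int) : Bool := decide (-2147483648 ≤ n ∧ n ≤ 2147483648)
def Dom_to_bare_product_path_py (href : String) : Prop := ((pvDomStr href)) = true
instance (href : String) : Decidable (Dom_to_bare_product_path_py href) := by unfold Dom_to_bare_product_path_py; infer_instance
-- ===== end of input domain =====

-- B computes one cut index by a single character scan against the rotating pattern
-- "../" (whole groups only) plus a slash run, and slices once — instead of A's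
-- three string-rebuilding peel loops (objective: alternative).

-- ===== PORT A =====
-- while href.startswith("../"): href = href[3:]
def pvAPeelDots (l : List Char) : List Char :=
  if h' : ['.', '.', '/'].isPrefixOf l then pvAPeelDots (l.drop 3) else l
termination_by l.length
decreasing_by
  have := (List.isPrefixOf_iff_prefix.mp h').length_le
  simp at this ⊢; omega

-- while href.startswith("/"): href = href[1:]
def pvAPeelSlash : List Char → List Char
  | [] => []
  | c :: t => if c = '/' then pvAPeelSlash t else c :: t

def to_bare_product_path_py (href : String) : String :=
  let s := (PySem.Str.strip href).toList
  let s := pvAPeelDots s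
  let s := pvAPeelSlash s
  let s := if "catalogue/".toList.isPrefixOf s then s.drop 10 else s
  String.ofList s

-- ===== PORT B =====
-- the rotating pattern "../"[i % 3]
def pvBPat (n : Nat) : Char := if n = 0 then '.' else if n = 1 then '.' else '/'

-- while i < len(s) and s[i] == "../"[i % 3]: i += 1   (carries the absolute index i)
def pvBScanDots : List Char → Nat → Nat
  | [], i => i
  | c :: t, i => if c = pvBPat (i % 3) then pvBScanDots t (i + 1) else i

-- while i < len(s) and s[i] == '/': i += 1   (counts the slash run at the cut)
def pvBSlashRun : List Char → Nat
  | [] => 0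
  | c :: t => if c = '/' then pvBSlashRun t + 1 else 0

def to_bare_product_path_py_alt (href : String) : String :=
  let l := (PySem.Str.strip href).toList
  let i := pvBScanDots l 0
  let i := i - i % 3
  let i := i + pvBSlashRun (l.drop i)
  let i := i + (if "catalogue/".toList.isPrefixOf (l.drop i) then 10 else 0)
  String.ofList (l.drop i)

-- ===== PRECONDITION & SPEC =====
def Spec_to_bare_product_path_py (href : String) (out : String) : Prop := out = to_bare_product_path_py_alt href
instance (href : String) (out : String) : Decidable (Spec_to_bare_product_path_py href out) := by unfold Spec_to_bare_product_path_py; infer_instance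

-- ===== CLAIM (what is proved, stated in full; the proofs are below) =====
def Claim_equal_to_bare_product_path_py : Prop := ∀ (href : String), Dom_to_bare_product_path_py href → Spec_to_bare_product_path_py href (to_bare_product_path_py href)

-- ===== LEMMAS AND PROOFS =====
theorem scanDots_shift (l : List Char) (i : Nat) :
    pvBScanDots l (i + 3) = pvBScanDots l i + 3 := by
  induction l generalizing i with
  | nil => rfl
  | cons c t ih =>
    have hm : (i + 3) % 3 = i % 3 := by omega
    simp only [pvBScanDots, hm]
    split
    · have := ih (i + 1)
      have : i + 3 + 1 = i + 1 + 3 := by omega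
      simp_all
    · rfl

theorem scanDots_prefix (l : List Char) (h : ['.', '.', '/'].isPrefixOf l) :
    pvBScanDots l 0 = pvBScanDots (l.drop 3) 0 + 3 := by
  obtain ⟨t, rfl⟩ := List.isPrefixOf_iff_prefix.mp h
  show pvBScanDots ('.' :: '.' :: '/' :: t) 0 = pvBScanDots t 0 + 3
  simp [pvBScanDots, pvBPat]
  exact scanDots_shift t 0

theorem scanDots_noprefix (l : List Char) (h : ¬ ['.', '.', '/'].isPrefixOf l) :
    pvBScanDots l 0 ≤ 2 := by
  match l with
  | [] => simp [pvBScanDots]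
  | [c] =>
    simp only [pvBScanDots]; split <;> omega
  | [c, c2] =>
    simp only [pvBScanDots]
    split
    · show pvBScanDots [c2] 1 ≤ 2
      simp only [pvBScanDots]; split <;> omega
    · omega
  | c :: c2 :: c3 :: t =>
    by_cases h1 : c = '.'
    · by_cases h2 : c2 = '.'
      · by_cases h3 : c3 = '/'
        · exact absurd (by simp [h1, h2, h3]) h
        · simp [pvBScanDots, pvBPat, h1, h2, h3]
      · simp [pvBScanDots, pvBPat, h1, h2]
    · simp [pvBScanDots, pvBPat, h1]

theorem peelDots_eq_drop (l : List Char) :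
    pvAPeelDots l = l.drop (pvBScanDots l 0 - pvBScanDots l 0 % 3) := by
  induction l using pvAPeelDots.induct with
  | case1 l h ih =>
    rw [pvAPeelDots, dif_pos h, ih, scanDots_prefix l h, List.drop_drop]
    congr 1
    omega
  | case2 l h =>
    rw [pvAPeelDots, dif_neg h]
    have := scanDots_noprefix l h
    have hz : pvBScanDots l 0 - pvBScanDots l 0 % 3 = 0 := by omega
    rw [hz, List.drop_zero]

theorem peelSlash_eq_drop (l : List Char) : pvAPeelSlash l = l.drop (pvBSlashRun l) := by
  induction l with
  | nil => simp [pvAPeelSlash, pvBSlashRun]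
  | cons c t ih =>
    by_cases h : c = '/'
    · simp [pvAPeelSlash, pvBSlashRun, h, ih]
    · simp [pvAPeelSlash, pvBSlashRun, h]

-- ===== VERDICT (by name: the statement is the Claim_ definition above) =====
theorem to_bare_product_path_py_spec : Claim_equal_to_bare_product_path_py := by
  intro href _
  unfold Spec_to_bare_product_path_py to_bare_product_path_py to_bare_product_path_py_alt
  simp only [peelDots_eq_drop, peelSlash_eq_drop, List.drop_drop]
  split
  · rfl
  · simp
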